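-- pv_equiv track=rewrite | github.com/NanJiang16/SARS-CoV-2_Deletion_detection_from_amplicon-seq | standardize_alignments.py | compact_cigartuples
-- ===== SOURCE A (Python) =====
-- def compact_cigartuples(cigartuples):
--     """Combine adjacent operations of the same type in a CIGAR string"""
--     compacted = []
--     i = 0
--     while i < len(cigartuples):
--         op, length = cigartuples[i]
--         j = i + 1
--         while j < len(cigartuples) and cigartuples[j][0] == op:
--             length += cigartuples[j][1]
--             j += 1
--         compacted.append((op, length))
--         i = j
--     return compacted
-- ===== SOURCE B (Python) =====
-- def compact_cigartuples(cigartuples):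
--     """Combine adjacent operations of the same type in a CIGAR string"""
--     compacted = []
--     for op, length in cigartuples:
--         if compacted and compacted[-1][0] == op:
--             compacted[-1] = (op, compacted[-1][1] + length)
--         else:
--             compacted.append((op, length))
--     return compacted
-- ===== Notes on version B (the rewrite author's own statement) =====
-- stated objective: simpler
-- what changed: Replaces A's nested while-loops (outer index plus inner lookahead scan over the same run) with one flat pass that merges each tuple into the last written output group.
import Mathlib
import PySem

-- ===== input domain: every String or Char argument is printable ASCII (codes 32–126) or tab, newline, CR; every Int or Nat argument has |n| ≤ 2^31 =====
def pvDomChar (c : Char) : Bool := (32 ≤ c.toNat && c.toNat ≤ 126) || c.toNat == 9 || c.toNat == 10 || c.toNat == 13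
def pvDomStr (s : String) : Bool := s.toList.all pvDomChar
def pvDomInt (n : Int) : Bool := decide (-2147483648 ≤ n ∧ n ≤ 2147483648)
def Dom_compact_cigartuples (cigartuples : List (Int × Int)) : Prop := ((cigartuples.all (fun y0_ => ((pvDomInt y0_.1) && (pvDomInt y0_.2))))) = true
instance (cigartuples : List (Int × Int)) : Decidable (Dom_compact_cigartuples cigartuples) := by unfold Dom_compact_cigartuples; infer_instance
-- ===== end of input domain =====

-- B replaces A's nested while-loops with one flat pass merging into the last output group (simpler decomposition, same O(n) cost).


-- ===== PORT A =====
-- inner while loop: while j < len and cigartuples[j][0] == op: length += cigartuples[j][1]; j += 1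
-- represented structurally: returns (final length, remaining suffix from j on)
def pvGatherA (op : Int) (length : Int) : List (Int × Int) → Int × List (Int × Int)
  | [] => (length, [])
  | (o, l) :: t => if o = op then pvGatherA op (length + l) t else (length, (o, l) :: t)

-- termination lemma for the outer loop (the suffix the inner loop leaves is no longer)
theorem pvGatherA_len_le (op length : Int) (xs : List (Int × Int)) :
    (pvGatherA op length xs).2.length ≤ xs.length := by
  induction xs generalizing length with
  | nil => simp [pvGatherA]
  | cons h t ih =>
    obtain ⟨o, l⟩ := h
    by_cases ho : o = op
    · simpa [pvGatherA, ho] using Nat.le_succ_of_le (ih (length + l))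
    · simp [pvGatherA, ho]

-- outer while loop over i, appending one compacted group per iteration
def compact_cigartuples (cigartuples : List (Int × Int)) : List (Int × Int) :=
  match cigartuples with
  | [] => []
  | (op, length) :: t =>
    let g := pvGatherA op length t
    (op, g.1) :: compact_cigartuples g.2
termination_by cigartuples.length
decreasing_by
  simpa using Nat.lt_succ_of_le (pvGatherA_len_le op length t)

-- ===== PORT B =====
-- one step of B's flat loop: merge (op, length) into compacted[-1] or append
def pvStepB (compacted : List (Int × Int)) (p : Int × Int) : List (Int × Int) :=
  match compacted.getLast? with
  | some last => if last.1 = p.1 then compacted.dropLast ++ [(p.1, last.2 + p.2)]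
                 else compacted ++ [p]
  | none => compacted ++ [p]

def compact_cigartuples_alt (cigartuples : List (Int × Int)) : List (Int × Int) :=
  cigartuples.foldl pvStepB []

-- ===== PRECONDITION & SPEC =====
def Spec_compact_cigartuples (cigartuples : List (Int × Int)) (out : List (Int × Int)) : Prop := out = compact_cigartuples_alt cigartuples
instance (cigartuples : List (Int × Int)) (out : List (Int × Int)) : Decidable (Spec_compact_cigartuples cigartuples out) := by unfold Spec_compact_cigartuples; infer_instance

-- ===== CLAIM (what is proved, stated in full; the proofs are below) =====
def Claim_equal_compact_cigartuples : Prop := ∀ (cigartuples : List (Int × Int)), Dom_compact_cigartuples cigartuples → Spec_compact_cigartuples cigartuples (compact_cigartuples cigartuples)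

-- ===== LEMMAS AND PROOFS =====

-- B's fold with a pending last group (op, length) equals A's group-scan from that state
theorem pvFold_pending (xs : List (Int × Int)) (acc : List (Int × Int)) (op length : Int) :
    List.foldl pvStepB (acc ++ [(op, length)]) xs
      = acc ++ (op, (pvGatherA op length xs).1) :: compact_cigartuples (pvGatherA op length xs).2 := by
  induction xs generalizing acc op length with
  | nil => simp [pvGatherA, compact_cigartuples]
  | cons h t ih =>
    obtain ⟨o, l⟩ := h
    by_cases ho : o = op
    · subst ho
      have : pvStepB (acc ++ [(o, length)]) (o, l) = acc ++ [(o, length + l)] := by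
        simp [pvStepB]
      simp only [List.foldl_cons, this, pvGatherA]
      exact ih acc o (length + l)
    · have hstep : pvStepB (acc ++ [(op, length)]) (o, l)
          = (acc ++ [(op, length)]) ++ [(o, l)] := by
        simp [pvStepB, Ne.symm ho]
      simp only [List.foldl_cons, hstep, pvGatherA, if_neg ho]
      rw [ih (acc ++ [(op, length)]) o l]
      rw [compact_cigartuples]
      simp

-- ===== VERDICT (by name: the statement is the Claim_ definition above) =====
theorem compact_cigartuples_spec : Claim_equal_compact_cigartuples := by
  intro cigartuples _
  unfold Spec_compact_cigartuples compact_cigartuples_alt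
  match cigartuples with
  | [] => simp [compact_cigartuples]
  | (op, length) :: t =>
    rw [compact_cigartuples]
    simpa using (pvFold_pending t [] op length).symm
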